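-- pv_equiv track=rewrite | github.com/OoABYSSoO/TooGraph | backend/app/core/control_flow_state_analysis.py | _branch_path_signatures_are_compatible
-- ===== SOURCE A (Python) =====
-- from typing import TypeAlias
--
-- BranchPathSignature: TypeAlias = frozenset[tuple[str, str]]
--
-- def _branch_path_signatures_are_compatible(left: BranchPathSignature, right: BranchPathSignature) -> bool:
--     selected_branches: dict[str, str] = {}
--     for condition_source, branch in (*left, *right):
--         selected_branch = selected_branches.get(condition_source)
--         if selected_branch is not None and selected_branch != branch:
--             return False
--         selected_branches[condition_source] = branch
--     return True
-- ===== SOURCE B (Python) =====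
-- def _branch_path_signatures_are_compatible(left, right):
--     union = left | right
--     return len({condition_source for condition_source, _ in union}) == len(union)
-- ===== Notes on version B (the rewrite author's own statement) =====
-- stated objective: simpler
-- what changed: Replaces the early-exit loop that maintains a running condition_source->branch dict with a one-line cardinality comparison: the pair set is conflict-free iff the number of distinct condition_sources in left|right equals the number of distinct pairs.
import Mathlib
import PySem

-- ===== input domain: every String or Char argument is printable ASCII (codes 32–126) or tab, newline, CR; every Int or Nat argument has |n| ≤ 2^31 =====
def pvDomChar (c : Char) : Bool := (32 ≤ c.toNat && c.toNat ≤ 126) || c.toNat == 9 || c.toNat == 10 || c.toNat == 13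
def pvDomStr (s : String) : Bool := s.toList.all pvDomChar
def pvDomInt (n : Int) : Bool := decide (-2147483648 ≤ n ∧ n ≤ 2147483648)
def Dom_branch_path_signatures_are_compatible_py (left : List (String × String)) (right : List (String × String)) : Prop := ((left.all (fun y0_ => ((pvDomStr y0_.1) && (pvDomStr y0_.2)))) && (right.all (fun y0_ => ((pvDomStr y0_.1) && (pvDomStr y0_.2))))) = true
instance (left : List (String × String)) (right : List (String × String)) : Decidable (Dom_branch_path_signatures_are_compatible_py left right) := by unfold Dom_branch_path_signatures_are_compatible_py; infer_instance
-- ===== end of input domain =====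

-- B replaces A's early-exit loop over a running dict with a cardinality comparison of two
-- deduplicated sets (objective: simpler). A iterates its frozensets in hash order, which the
-- ports replay in list order; the returned Bool does not depend on that order.

-- ===== PORT A =====
-- the 'for condition_source, branch in (*left, *right)' loop with its early 'return False'
def pvLoopA : PySem.Dict String String → List (String × String) → Bool
  | _, [] => true
  | d, (condition_source, branch) :: rest =>
    match PySem.Dict.get? d condition_source with
    | some selected_branch =>
      if selected_branch ≠ branch then false
      else pvLoopA (PySem.Dict.insert d condition_source branch) rest
    | none => pvLoopA (PySem.Dict.insert d condition_source branch) rest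

def branch_path_signatures_are_compatible_py (left : List (String × String)) (right : List (String × String)) : Bool :=
  pvLoopA PySem.Dict.empty (left ++ right)

-- ===== PORT B =====
def branch_path_signatures_are_compatible_py_alt (left : List (String × String)) (right : List (String × String)) : Bool :=
  let union : PySem.Set (String × String) := PySem.Set.union (PySem.Set.ofList left) right
  PySem.Set.len (PySem.Set.ofList (union.map Prod.fst)) == PySem.Set.len union

-- ===== PRECONDITION & SPEC =====
def Spec_branch_path_signatures_are_compatible_py (left : List (String × String)) (right : List (String × String)) (out : Bool) : Prop := out = branch_path_signatures_are_compatible_py_alt left right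
instance (left : List (String × String)) (right : List (String × String)) (out : Bool) : Decidable (Spec_branch_path_signatures_are_compatible_py left right out) := by unfold Spec_branch_path_signatures_are_compatible_py; infer_instance

-- ===== CLAIM (what is proved, stated in full; the proofs are below) =====
def Claim_equal_branch_path_signatures_are_compatible_py : Prop := ∀ (left : List (String × String)) (right : List (String × String)), Dom_branch_path_signatures_are_compatible_py left right → Spec_branch_path_signatures_are_compatible_py left right (branch_path_signatures_are_compatible_py left right)

-- ===== LEMMAS AND PROOFS =====

-- "no condition_source occurs with two different branches" — the property both programs decide
def pvFun (xs : List (String × String)) : Prop :=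
  ∀ p ∈ xs, ∀ q ∈ xs, p.1 = q.1 → p.2 = q.2

theorem pvFoldl_add_sublist {α : Type} [BEq α] (xs : List α) (s : List α) :
    ∃ t, xs.foldl PySem.Set.add s = s ++ t ∧ t.Sublist xs := by
  induction xs generalizing s with
  | nil => exact ⟨[], by simp⟩
  | cons x xs ih =>
    simp only [List.foldl_cons]
    by_cases h : List.contains s x
    · obtain ⟨t, ht, hs⟩ := ih s
      refine ⟨t, ?_, hs.cons x⟩
      simpa [PySem.Set.add, PySem.Set.contains, h] using ht
    · obtain ⟨t, ht, hs⟩ := ih (s ++ [x])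
      refine ⟨x :: t, ?_, hs.cons₂ x⟩
      rw [show PySem.Set.add s x = s ++ [x] by
        simp [PySem.Set.add, PySem.Set.contains, h]]
      simpa using ht

theorem pvFoldl_add_of_nodup {α : Type} [BEq α] [LawfulBEq α] (xs : List α) (s : List α)
    (h : (s ++ xs).Nodup) : xs.foldl PySem.Set.add s = s ++ xs := by
  induction xs generalizing s with
  | nil => simp
  | cons x xs ih =>
    have hx : x ∉ s := fun hmem =>
      (List.disjoint_of_nodup_append h) hmem List.mem_cons_self
    have h' : ((s ++ [x]) ++ xs).Nodup := by simpa using h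
    rw [List.foldl_cons,
      show PySem.Set.add s x = s ++ [x] by
        simp [PySem.Set.add, PySem.Set.contains, hx],
      ih (s ++ [x]) h']
    simp

-- length of the deduplication equals the length iff the list already had no duplicates
theorem pvLen_ofList_eq_iff {α : Type} [BEq α] [LawfulBEq α] (ys : List α) :
    (PySem.Set.ofList ys).length = ys.length ↔ ys.Nodup := by
  constructor
  · intro h
    obtain ⟨t, ht, hs⟩ := pvFoldl_add_sublist ys []
    have hofl : PySem.Set.ofList ys = t := by
      simpa [PySem.Set.ofList_eq_foldl] using ht
    have hty : t = ys := hs.eq_of_length (by rw [← hofl]; exact h)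
    have hnd := PySem.Set.nodup_ofList (α := α) ys
    rwa [hofl, hty] at hnd
  · intro h
    have : PySem.Set.ofList ys = ys := by
      rw [PySem.Set.ofList_eq_foldl]
      simpa using pvFoldl_add_of_nodup ys [] (by simpa using h)
    rw [this]

-- characterisation of A's loop: true iff the remaining pairs are self-consistent and
-- consistent with the dict accumulated so far
theorem pvLoopA_eq_true_iff (xs : List (String × String)) (d : PySem.Dict String String) :
    pvLoopA d xs = true ↔
      pvFun xs ∧ ∀ p ∈ xs, ∀ sb, d.get? p.1 = some sb → sb = p.2 := by
  induction xs generalizing d with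
  | nil => simp [pvLoopA, pvFun]
  | cons hd rest ih =>
    obtain ⟨cs, b⟩ := hd
    have key : (d.get? cs = none ∨ d.get? cs = some b) →
        ((pvLoopA (d.insert cs b) rest = true) ↔
        (pvFun ((cs, b) :: rest) ∧
          ∀ p ∈ (cs, b) :: rest, ∀ sb, d.get? p.1 = some sb → sb = p.2)) := by
      intro hcs
      rw [ih]
      constructor
      · rintro ⟨hf, hcons⟩
        refine ⟨?_, ?_⟩
        · rintro p hp q hq hpq
          rcases List.mem_cons.1 hp with hp | hp <;>
            rcases List.mem_cons.1 hq with hq | hq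
          · rw [hp, hq]
          · subst hp
            have hb := hcons q hq b (by rw [PySem.Dict.get?_insert]; simp [← hpq])
            simpa using hb
          · subst hq
            have hb := hcons p hp b (by rw [PySem.Dict.get?_insert]; simp [hpq])
            simpa using hb.symm
          · exact hf p hp q hq hpq
        · rintro p hp sb hsb
          rcases List.mem_cons.1 hp with hp | hp
          · subst hp
            rcases hcs with hnone | hsome
            · rw [hnone] at hsb; cases hsb
            · rw [hsome] at hsb
              injection hsb with hbe
              simpa using hbe.symm
          · by_cases hpc : p.1 = cs
            · rcases hcs with hnone | hsome
              · rw [hpc, hnone] at hsb; cases hsb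
              · rw [hpc, hsome] at hsb
                obtain rfl : b = sb := by injection hsb
                exact hcons p hp b (by rw [PySem.Dict.get?_insert]; simp [hpc])
            · exact hcons p hp sb
                (by rw [PySem.Dict.get?_insert]; simpa [hpc] using hsb)
      · rintro ⟨hf, hcons⟩
        refine ⟨?_, ?_⟩
        · intro p hp q hq hpq
          exact hf p (List.mem_cons_of_mem _ hp) q (List.mem_cons_of_mem _ hq) hpq
        · intro p hp sb hsb
          rw [PySem.Dict.get?_insert] at hsb
          by_cases hpc : p.1 = cs
          · rw [if_pos hpc] at hsb
            injection hsb with hbe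
            subst hbe
            exact hf (cs, b) List.mem_cons_self p (List.mem_cons_of_mem _ hp) hpc.symm
          · rw [if_neg hpc] at hsb
            exact hcons p (List.mem_cons_of_mem _ hp) sb hsb
    cases hget : PySem.Dict.get? d cs with
    | none =>
      rw [show pvLoopA d ((cs, b) :: rest) = pvLoopA (d.insert cs b) rest by
        simp [pvLoopA, hget]]
      exact key (Or.inl hget)
    | some sb =>
      by_cases hsb : sb = b
      · rw [show pvLoopA d ((cs, b) :: rest) = pvLoopA (d.insert cs b) rest by
          simp [pvLoopA, hget, hsb]]
        exact key (Or.inr (by rw [hget, hsb]))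
      · rw [show pvLoopA d ((cs, b) :: rest) = false by
          simp [pvLoopA, hget, hsb]]
        simp only [Bool.false_eq_true, false_iff, not_and]
        intro _ hcons
        exact hsb (hcons (cs, b) List.mem_cons_self sb hget)

-- characterisation of B: true iff the concatenation is self-consistent
theorem pvAlt_eq_true_iff (left right : List (String × String)) :
    branch_path_signatures_are_compatible_py_alt left right = true ↔ pvFun (left ++ right) := by
  unfold branch_path_signatures_are_compatible_py_alt
  set u : PySem.Set (String × String) := PySem.Set.union (PySem.Set.ofList left) right with hu
  have hnodup : List.Nodup u :=
    PySem.Set.nodup_union _ _ (PySem.Set.nodup_ofList left)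
  have hmem : ∀ x, x ∈ u ↔ x ∈ left ++ right := by
    intro x
    rw [hu, PySem.Set.mem_union, PySem.Set.mem_ofList, List.mem_append]
  simp only [PySem.Set.len, beq_iff_eq, Nat.cast_inj]
  rw [show ((PySem.Set.ofList (u.map Prod.fst)).length = u.length ↔
      (PySem.Set.ofList (u.map Prod.fst)).length = (u.map Prod.fst).length) by
    rw [List.length_map]]
  rw [pvLen_ofList_eq_iff]
  rw [List.nodup_map_iff_inj_on hnodup]
  constructor
  · intro hinj p hp q hq hpq
    have := hinj p ((hmem p).2 hp) q ((hmem q).2 hq) hpq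
    rw [this]
  · intro hf x hx y hy hxy
    have h2 := hf x ((hmem x).1 hx) y ((hmem y).1 hy) hxy
    exact Prod.ext hxy h2

-- ===== VERDICT (by name: the statement is the Claim_ definition above) =====
theorem branch_path_signatures_are_compatible_py_spec : Claim_equal_branch_path_signatures_are_compatible_py := by
  intro left right _
  unfold Spec_branch_path_signatures_are_compatible_py
  rw [Bool.eq_iff_iff, pvAlt_eq_true_iff]
  unfold branch_path_signatures_are_compatible_py
  rw [pvLoopA_eq_true_iff]
  constructor
  · rintro ⟨hf, _⟩; exact hf
  · intro hf
    exact ⟨hf, by intro p _ sb hsb; simp [PySem.Dict.get?_empty] at hsb⟩
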